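-- pv_equiv track=rewrite | github.com/TianYuan-Liu/tusco-paper | src/tusco_selector/pipeline/splice_tss_check.py | _highest_novel_junction_coverage
-- ===== SOURCE A (Python) =====
-- from typing import Dict, List, Set, Tuple
--
-- JunctionKey = Tuple[str, int, int, str]  # (chrom, start, end, strand)
--
-- def _highest_novel_junction_coverage(
--     annotated: List[JunctionKey],
--     junction_index: dict[Tuple[str, str], list[Tuple[int, int, int]]],
--     gene_region: Tuple[int, int],
--     min_length: int = 0,
-- ) -> Tuple[int, int, int]:
--     """Return a triple (max_cov, max_start, max_end) for the novel junction with the highest coverage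
--     inside gene_region, considering only junctions with length ≥ min_length. If none, return (0, -1, -1).
--     """
--     gene_start, gene_end = gene_region
--     if not annotated:
--         return 0, -1, -1
--
--     annotated_set = set(annotated)
--     chrom_strand_pairs = {(c, s) for (c, _s, _e, s) in annotated}
--
--     max_cov = 0
--     max_start = -1
--     max_end = -1
--     for chrom, strand in chrom_strand_pairs:
--         for s, e, cov in junction_index.get((chrom, strand), []):
--             if s > gene_end:
--                 break  # lists are sorted by start – nothing further can overlap
--             # Only consider junctions fully contained within the gene region
--             if s < gene_start or e > gene_end:
--                 continue
--             if (e - s + 1) < min_length: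
--                 continue  # skip short junctions
--             if (chrom, s, e, strand) in annotated_set:
--                 continue  # annotated junction – ignore
--             if cov > max_cov:
--                 max_cov = cov
--                 max_start = s
--                 max_end = e
--     return max_cov, max_start, max_end
-- ===== SOURCE B (Python) =====
-- def _highest_novel_junction_coverage(annotated, junction_index, gene_region, min_length=0):
--     gene_start, gene_end = gene_region
--     if not annotated:
--         return 0, -1, -1
--     ann = set(annotated)
--     wanted = {(c, st) for (c, _s, _e, st) in annotated}
--
--     def region_prefix(juncs):
--         out = []
--         for j in juncs:
--             if j[0] > gene_end:
--                 break
--             out.append(j)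
--         return out
--
--     pool = [(cov, s, e)
--             for (chrom, strand), juncs in junction_index.items()
--             if (chrom, strand) in wanted
--             for (s, e, cov) in region_prefix(juncs)
--             if gene_start <= s and e <= gene_end
--             and e - s + 1 >= min_length
--             and (chrom, s, e, strand) not in ann
--             and cov > 0]
--     pool.sort(key=lambda t: t[0], reverse=True)
--     return pool[0] if pool else (0, -1, -1)
-- ===== Notes on version B (the rewrite author's own statement) =====
-- stated objective: alternative
-- what changed: B collects every eligible novel junction from all relevant keys into one flat candidate pool via a comprehension, stably sorts the pool by coverage descending and returns its head, instead of A's nested loops threading a running maximum through break/continue scans.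
import Mathlib
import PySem

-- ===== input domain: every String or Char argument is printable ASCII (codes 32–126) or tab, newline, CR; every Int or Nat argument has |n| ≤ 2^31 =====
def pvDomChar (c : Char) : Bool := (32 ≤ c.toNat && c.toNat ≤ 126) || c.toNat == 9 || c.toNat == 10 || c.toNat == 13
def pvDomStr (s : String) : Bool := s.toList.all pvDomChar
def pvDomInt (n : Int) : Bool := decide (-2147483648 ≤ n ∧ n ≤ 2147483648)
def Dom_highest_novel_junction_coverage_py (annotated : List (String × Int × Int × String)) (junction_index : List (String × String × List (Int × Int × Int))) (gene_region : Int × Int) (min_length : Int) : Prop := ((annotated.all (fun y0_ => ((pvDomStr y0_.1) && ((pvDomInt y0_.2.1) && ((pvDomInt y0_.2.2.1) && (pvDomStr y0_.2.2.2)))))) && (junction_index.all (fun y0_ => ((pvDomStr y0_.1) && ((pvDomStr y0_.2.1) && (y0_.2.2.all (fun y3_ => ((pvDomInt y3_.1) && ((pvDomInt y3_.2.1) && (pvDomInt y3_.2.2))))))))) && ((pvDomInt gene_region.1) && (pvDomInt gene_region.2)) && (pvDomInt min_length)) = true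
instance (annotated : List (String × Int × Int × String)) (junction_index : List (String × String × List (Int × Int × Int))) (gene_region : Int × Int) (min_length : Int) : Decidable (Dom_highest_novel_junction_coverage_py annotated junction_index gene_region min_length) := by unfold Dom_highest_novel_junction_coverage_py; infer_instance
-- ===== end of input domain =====

-- B gathers every eligible novel junction into one flat candidate pool, stably sorts it by
-- coverage descending and returns its head, instead of A's nested scan threading a running
-- maximum through break/continue loops; same asymptotic cost up to the sort (objective: alternative).


-- ===== PORT A =====
-- inner 'for s, e, cov in junction_index.get((chrom, strand), [])' loop, with its break/continue chain
def pvInnerA (chrom strand : String) (annSet : PySem.Set (String × Int × Int × String))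
    (gene_start gene_end min_length : Int) :
    List (Int × Int × Int) → (Int × Int × Int) → (Int × Int × Int)
  | [], st => st
  | j :: rest, st =>
      if j.1 > gene_end then st  -- break
      else if j.1 < gene_start ∨ j.2.1 > gene_end then
        pvInnerA chrom strand annSet gene_start gene_end min_length rest st  -- continue
      else if j.2.1 - j.1 + 1 < min_length then
        pvInnerA chrom strand annSet gene_start gene_end min_length rest st  -- continue
      else if PySem.Set.contains annSet (chrom, j.1, j.2.1, strand) then
        pvInnerA chrom strand annSet gene_start gene_end min_length rest st  -- continue
      else if j.2.2 > st.1 then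
        pvInnerA chrom strand annSet gene_start gene_end min_length rest (j.2.2, j.1, j.2.1)
      else
        pvInnerA chrom strand annSet gene_start gene_end min_length rest st

def highest_novel_junction_coverage_py (annotated : List (String × Int × Int × String)) (junction_index : List (String × String × List (Int × Int × Int))) (gene_region : Int × Int) (min_length : Int) : Int × Int × Int :=
  let gene_start := gene_region.1
  let gene_end := gene_region.2
  if annotated = [] then (0, -1, -1)
  else
    let annotated_set := PySem.Set.ofList annotated
    let chrom_strand_pairs := PySem.Set.ofList (annotated.map (fun a => (a.1, a.2.2.2)))
    let idx : PySem.Dict (String × String) (List (Int × Int × Int)) :=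
      PySem.Dict.mk (junction_index.map (fun t => ((t.1, t.2.1), t.2.2)))
    List.foldl
      (fun st p =>
        pvInnerA p.1 p.2 annotated_set gene_start gene_end min_length
          (idx.getD (p.1, p.2) []) st)
      (0, -1, -1) chrom_strand_pairs

-- ===== PORT B =====
-- Source B's helper region_prefix: the entries before the first start beyond gene_end (loop with break)
def pvRegionPrefix (gene_end : Int) : List (Int × Int × Int) → List (Int × Int × Int)
  | [] => []
  | j :: rest => if j.1 > gene_end then [] else j :: pvRegionPrefix gene_end rest

def highest_novel_junction_coverage_py_alt (annotated : List (String × Int × Int × String)) (junction_index : List (String × String × List (Int × Int × Int))) (gene_region : Int × Int) (min_length : Int) : Int × Int × Int :=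
  let gene_start := gene_region.1
  let gene_end := gene_region.2
  if annotated = [] then (0, -1, -1)
  else
    let ann := PySem.Set.ofList annotated
    let wanted := PySem.Set.ofList (annotated.map (fun a => (a.1, a.2.2.2)))
    -- the pool comprehension over junction_index.items()
    let pool : List (Int × Int × Int) := junction_index.flatMap (fun t =>
      if PySem.Set.contains wanted (t.1, t.2.1) then
        ((pvRegionPrefix gene_end t.2.2).filter
          (fun j => decide (gene_start ≤ j.1) && decide (j.2.1 ≤ gene_end) &&
            decide (j.2.1 - j.1 + 1 ≥ min_length) &&
            !(PySem.Set.contains ann (t.1, j.1, j.2.1, t.2.1)) &&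
            decide (j.2.2 > 0))).map (fun j => (j.2.2, j.1, j.2.1))
      else [])
    -- pool.sort(key=lambda t: t[0], reverse=True); return pool[0] if pool else (0, -1, -1)
    match PySem.List.sorted pool (fun c => c.1) true with
    | [] => (0, -1, -1)
    | x :: _ => x

-- ===== PRECONDITION & SPEC =====
-- the (chrom, strand) key of one junction_index item
def pvKeyOf (t : String × String × List (Int × Int × Int)) : String × String := (t.1, t.2.1)
-- the (chrom, strand) pairs occurring in annotated
def pvPairs (annotated : List (String × Int × Int × String)) : List (String × String) :=
  annotated.map (fun a => (a.1, a.2.2.2))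
-- j is an eligible novel junction of item t: among the entries before the first start beyond
-- gene_end, fully inside the gene region, long enough, not annotated, with positive coverage
def pvEligB (annotated : List (String × Int × Int × String)) (gene_region : Int × Int)
    (min_length : Int) (t : String × String × List (Int × Int × Int))
    (j : Int × Int × Int) : Bool :=
  decide (j ∈ t.2.2.takeWhile (fun x => decide (x.1 ≤ gene_region.2)) ∧
    gene_region.1 ≤ j.1 ∧ j.2.1 ≤ gene_region.2 ∧ min_length ≤ j.2.1 - j.1 + 1 ∧
    (t.1, j.1, j.2.1, t.2.1) ∉ annotated ∧ 0 < j.2.2)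

-- Pre_ excludes inputs where junction_index carries duplicate (chrom, strand) keys, or where two
-- eligible in-region novel junctions under DIFFERENT keys of the annotated pair set share a
-- coverage value with different coordinates: there A's winner depends on Python's hash-based
-- set-iteration order, so the returned triple is an accident of the interpreter, not a value to specify.
def Pre_highest_novel_junction_coverage_py (annotated : List (String × Int × Int × String)) (junction_index : List (String × String × List (Int × Int × Int))) (gene_region : Int × Int) (min_length : Int) : Prop :=
  junction_index.Pairwise (fun t u =>
    (decide (pvKeyOf t ≠ pvKeyOf u) &&
      (!decide (pvKeyOf t ∈ pvPairs annotated) || !decide (pvKeyOf u ∈ pvPairs annotated) ||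
        t.2.2.all (fun j => u.2.2.all (fun j' =>
          !pvEligB annotated gene_region min_length t j ||
          !pvEligB annotated gene_region min_length u j' ||
          !decide (j.2.2 = j'.2.2) ||
          decide (j.1 = j'.1 ∧ j.2.1 = j'.2.1))))) = true)
instance (annotated : List (String × Int × Int × String)) (junction_index : List (String × String × List (Int × Int × Int))) (gene_region : Int × Int) (min_length : Int) : Decidable (Pre_highest_novel_junction_coverage_py annotated junction_index gene_region min_length) := by unfold Pre_highest_novel_junction_coverage_py; infer_instance

def pvWitness_highest_novel_junction_coverage_py : (List (String × Int × Int × String)) × (List (String × String × List (Int × Int × Int))) × (Int × Int) × Int :=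
  ([("chr1", 1, 2, "+")], [("chr1", "+", [(3, 4, 5)])], (0, 10), 0)

def Spec_highest_novel_junction_coverage_py (annotated : List (String × Int × Int × String)) (junction_index : List (String × String × List (Int × Int × Int))) (gene_region : Int × Int) (min_length : Int) (out : Int × Int × Int) : Prop := out = highest_novel_junction_coverage_py_alt annotated junction_index gene_region min_length
instance (annotated : List (String × Int × Int × String)) (junction_index : List (String × String × List (Int × Int × Int))) (gene_region : Int × Int) (min_length : Int) (out : Int × Int × Int) : Decidable (Spec_highest_novel_junction_coverage_py annotated junction_index gene_region min_length out) := by unfold Spec_highest_novel_junction_coverage_py; infer_instance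

-- ===== CLAIM (what is proved, stated in full; the proofs are below) =====
def Claim_equal_highest_novel_junction_coverage_py : Prop := ∀ (annotated : List (String × Int × Int × String)) (junction_index : List (String × String × List (Int × Int × Int))) (gene_region : Int × Int) (min_length : Int), Dom_highest_novel_junction_coverage_py annotated junction_index gene_region min_length → Pre_highest_novel_junction_coverage_py annotated junction_index gene_region min_length → Spec_highest_novel_junction_coverage_py annotated junction_index gene_region min_length (highest_novel_junction_coverage_py annotated junction_index gene_region min_length)

-- ===== LEMMAS AND PROOFS =====

theorem pv_witness_ok :
    Dom_highest_novel_junction_coverage_py (pvWitness_highest_novel_junction_coverage_py.1) (pvWitness_highest_novel_junction_coverage_py.2.1) (pvWitness_highest_novel_junction_coverage_py.2.2.1) (pvWitness_highest_novel_junction_coverage_py.2.2.2) ∧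
    Pre_highest_novel_junction_coverage_py (pvWitness_highest_novel_junction_coverage_py.1) (pvWitness_highest_novel_junction_coverage_py.2.1) (pvWitness_highest_novel_junction_coverage_py.2.2.1) (pvWitness_highest_novel_junction_coverage_py.2.2.2) := by
  constructor <;> decide

-- the candidate list of one (chrom, strand) block, WITHOUT the positivity filter (proof-side)
def pvCands (chrom strand : String) (annSet : PySem.Set (String × Int × Int × String))
    (gene_start gene_end min_length : Int) (juncs : List (Int × Int × Int)) :
    List (Int × Int × Int) :=
  ((pvRegionPrefix gene_end juncs).filter
      (fun j => decide (j.1 ≥ gene_start) && decide (j.2.1 ≤ gene_end) &&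
        decide (j.2.1 - j.1 + 1 ≥ min_length) &&
        !(PySem.Set.contains annSet (chrom, j.1, j.2.1, strand)))).map
    (fun j => (j.2.2, j.1, j.2.1))

-- the running-maximum update A performs
def pvUpd (st c : Int × Int × Int) : Int × Int × Int := if c.1 > st.1 then c else st

-- the foldl step of PySem.List.max? with key (·.1)
def pvStep (acc : Option (Int × Int × Int)) (x : Int × Int × Int) : Option (Int × Int × Int) :=
  match acc with
  | none => some x
  | some m => if m.1 < x.1 then some x else some m

theorem pvUpd_self (a : Int × Int × Int) : pvUpd a a = a := by
  simp [pvUpd]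

theorem pvUpd_assoc (m c v : Int × Int × Int) :
    pvUpd (pvUpd m c) v = pvUpd m (pvUpd c v) := by
  unfold pvUpd; split_ifs <;> first | rfl | omega

theorem pvUpd_fst_nonneg (st c : Int × Int × Int) (h : 0 ≤ st.1) : 0 ≤ (pvUpd st c).1 := by
  unfold pvUpd; split_ifs <;> omega

theorem pv_max?_eq (C : List (Int × Int × Int)) :
    PySem.List.max? C (fun c => c.1) = C.foldl pvStep none := by
  unfold PySem.List.max? pvStep
  congr 1
  funext acc x
  cases acc <;> rfl

theorem pv_foldl_step (C : List (Int × Int × Int)) :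
    ∀ m, C.foldl pvStep (some m) = some (pvUpd m ((C.foldl pvStep none).getD m)) := by
  induction C with
  | nil => intro m; simp [pvUpd_self]
  | cons c C ih =>
      intro m
      have h1 : pvStep (some m) c = some (pvUpd m c) := by
        show (if m.1 < c.1 then some c else some m) = some (if c.1 > m.1 then c else m)
        by_cases h : m.1 < c.1
        · rw [if_pos h, if_pos (show c.1 > m.1 from h)]
        · rw [if_neg h, if_neg (show ¬ c.1 > m.1 from h)]
      have h2 : pvStep none c = some c := rfl
      rw [List.foldl_cons, List.foldl_cons, h1, h2, ih (pvUpd m c), ih c]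
      cases hX : C.foldl pvStep none with
      | none => simp [pvUpd_self]
      | some v => simp [pvUpd_assoc]

theorem pv_foldl_upd (C : List (Int × Int × Int)) :
    ∀ st, C.foldl pvUpd st = pvUpd st ((C.foldl pvStep none).getD st) := by
  induction C with
  | nil => intro st; simp [pvUpd_self]
  | cons c C ih =>
      intro st
      have h2 : pvStep none c = some c := rfl
      rw [List.foldl_cons, List.foldl_cons, h2, ih (pvUpd st c), pv_foldl_step C c]
      cases hX : C.foldl pvStep none with
      | none => simp [pvUpd_self]
      | some v => simp [pvUpd_assoc]

theorem pv_block (C : List (Int × Int × Int)) (st : Int × Int × Int) (h : 0 ≤ st.1) :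
    C.foldl pvUpd st = pvUpd st (PySem.List.maxD C (fun c => c.1) (0, -1, -1)) := by
  rw [pv_foldl_upd]
  unfold PySem.List.maxD
  rw [pv_max?_eq]
  cases hX : C.foldl pvStep none with
  | none =>
      have : pvUpd st ((0 : Int), (-1 : Int), (-1 : Int)) = st := by
        unfold pvUpd; rw [if_neg]; simpa using h
      simp [pvUpd_self, this]
  | some v => simp

theorem pvRegionPrefix_eq_takeWhile (ge : Int) (L : List (Int × Int × Int)) :
    pvRegionPrefix ge L = L.takeWhile (fun x => decide (x.1 ≤ ge)) := by
  induction L with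
  | nil => rfl
  | cons j rest ih =>
      by_cases h : j.1 > ge
      · simp [pvRegionPrefix, h, show ¬ j.1 ≤ ge by omega]
      · simp [pvRegionPrefix, h, show j.1 ≤ ge by omega, ih]

theorem pv_cands_cons (c s : String) (aS : PySem.Set (String × Int × Int × String))
    (gs ge ml : Int) (j : Int × Int × Int) (rest : List (Int × Int × Int)) :
    pvCands c s aS gs ge ml (j :: rest) =
      if j.1 > ge then []
      else
        (if decide (j.1 ≥ gs) && decide (j.2.1 ≤ ge) && decide (j.2.1 - j.1 + 1 ≥ ml) &&
            !(PySem.Set.contains aS (c, j.1, j.2.1, s)) then [(j.2.2, j.1, j.2.1)] else []) ++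
        pvCands c s aS gs ge ml rest := by
  by_cases h : j.1 > ge
  · simp [pvCands, pvRegionPrefix, h]
  · simp only [pvCands, pvRegionPrefix, if_neg h, List.filter_cons]
    split_ifs <;> simp

theorem pv_innerA_eq (c s : String) (aS : PySem.Set (String × Int × Int × String))
    (gs ge ml : Int) (L : List (Int × Int × Int)) :
    ∀ st, pvInnerA c s aS gs ge ml L st = (pvCands c s aS gs ge ml L).foldl pvUpd st := by
  induction L with
  | nil => intro st; simp [pvInnerA, pvCands, pvRegionPrefix]
  | cons j rest ih =>
      intro st
      rw [pv_cands_cons]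
      by_cases h1 : j.1 > ge
      · simp [pvInnerA, h1]
      · rw [if_neg h1]
        by_cases h2 : j.1 < gs ∨ j.2.1 > ge
        · have hb : (decide (j.1 ≥ gs) && decide (j.2.1 ≤ ge) && decide (j.2.1 - j.1 + 1 ≥ ml) &&
              !(PySem.Set.contains aS (c, j.1, j.2.1, s))) = false := by
            rcases h2 with h2 | h2
            · simp [show ¬ j.1 ≥ gs by omega]
            · simp [show ¬ j.2.1 ≤ ge by omega]
          simp only [pvInnerA, if_neg h1, if_pos h2, hb, ih, List.nil_append, if_false,
            Bool.false_eq_true]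
        · by_cases h3 : j.2.1 - j.1 + 1 < ml
          · have hb : (decide (j.1 ≥ gs) && decide (j.2.1 ≤ ge) && decide (j.2.1 - j.1 + 1 ≥ ml) &&
                !(PySem.Set.contains aS (c, j.1, j.2.1, s))) = false := by
              simp [show ¬ j.2.1 - j.1 + 1 ≥ ml by omega]
            simp only [pvInnerA, if_neg h1, if_neg h2, if_pos h3, hb, ih, List.nil_append,
              if_false, Bool.false_eq_true]
          · by_cases h4 : PySem.Set.contains aS (c, j.1, j.2.1, s)
            · have hb : (decide (j.1 ≥ gs) && decide (j.2.1 ≤ ge) && decide (j.2.1 - j.1 + 1 ≥ ml) &&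
                  !(PySem.Set.contains aS (c, j.1, j.2.1, s))) = false := by
                simp only [h4, Bool.not_true, Bool.and_false]
              simp only [pvInnerA, if_neg h1, if_neg h2, if_neg h3, if_pos h4, hb, ih,
                List.nil_append, if_false, Bool.false_eq_true]
            · have hb : (decide (j.1 ≥ gs) && decide (j.2.1 ≤ ge) && decide (j.2.1 - j.1 + 1 ≥ ml) &&
                  !(PySem.Set.contains aS (c, j.1, j.2.1, s))) = true := by
                simp only [not_or, not_lt] at h2
                have hc : PySem.Set.contains aS (c, j.1, j.2.1, s) = false := by
                  simpa using h4
                simp only [hc, Bool.not_false, Bool.and_true, Bool.and_eq_true,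
                  decide_eq_true_eq]
                exact ⟨⟨by omega, by omega⟩, by omega⟩
              rw [hb]
              by_cases h5 : j.2.2 > st.1
              · simp only [pvInnerA, if_neg h1, if_neg h2, if_neg h3, if_neg h4, if_pos h5, ih,
                  if_true, List.singleton_append, List.foldl_cons]
                have : pvUpd st (j.2.2, j.1, j.2.1) = (j.2.2, j.1, j.2.1) := by
                  unfold pvUpd; rw [if_pos h5]
                rw [this]
              · simp only [pvInnerA, if_neg h1, if_neg h2, if_neg h3, if_neg h4, if_neg h5, ih,
                  if_true, List.singleton_append, List.foldl_cons]
                have : pvUpd st (j.2.2, j.1, j.2.1) = st := by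
                  unfold pvUpd; rw [if_neg h5]
                rw [this]

theorem pv_drop (l : List (Int × Int × Int)) :
    ∀ st, 0 ≤ st.1 →
      l.foldl pvUpd st = (l.filter (fun c => decide (0 < c.1))).foldl pvUpd st := by
  induction l with
  | nil => intro st _; rfl
  | cons c l ih =>
      intro st h
      by_cases hc : 0 < c.1
      · rw [List.foldl_cons, List.filter_cons_of_pos (by simpa using hc), List.foldl_cons]
        exact ih _ (pvUpd_fst_nonneg st c h)
      · have hst : pvUpd st c = st := by unfold pvUpd; rw [if_neg]; omega
        rw [List.foldl_cons, hst, List.filter_cons_of_neg (by simpa using hc)]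
        exact ih _ h

theorem pv_maxD_default_or_mem (C : List (Int × Int × Int)) :
    PySem.List.maxD C (fun c => c.1) (0, -1, -1) = (0, -1, -1) ∨
    PySem.List.maxD C (fun c => c.1) (0, -1, -1) ∈ C := by
  unfold PySem.List.maxD
  cases h : PySem.List.max? C (fun c => c.1) with
  | none => left; rfl
  | some m => right; simpa using PySem.List.max?_mem h

theorem pv_mem_cands {c s : String} {annotated : List (String × Int × Int × String)}
    {gs ge ml : Int} {L : List (Int × Int × Int)} {x : Int × Int × Int}
    (hx : x ∈ pvCands c s (PySem.Set.ofList annotated) gs ge ml L) :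
    ∃ j, j ∈ L ∧ j ∈ L.takeWhile (fun v => decide (v.1 ≤ ge)) ∧ gs ≤ j.1 ∧ j.2.1 ≤ ge ∧
      ml ≤ j.2.1 - j.1 + 1 ∧ (c, j.1, j.2.1, s) ∉ annotated ∧ x = (j.2.2, j.1, j.2.1) := by
  unfold pvCands at hx
  rw [pvRegionPrefix_eq_takeWhile] at hx
  obtain ⟨j, hj, rfl⟩ := List.mem_map.mp hx
  obtain ⟨hjtw, hcond⟩ := List.mem_filter.mp hj
  simp only [Bool.and_eq_true, decide_eq_true_eq, Bool.not_eq_true'] at hcond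
  obtain ⟨⟨⟨hgs, hge⟩, hml⟩, hct⟩ := hcond
  refine ⟨j, List.Sublist.mem hjtw (List.takeWhile_sublist _), hjtw, hgs, hge, hml, ?_, rfl⟩
  intro hmem
  have : PySem.Set.contains (PySem.Set.ofList annotated) (c, j.1, j.2.1, s) = true :=
    (PySem.Set.contains_iff _ _).mpr ((PySem.Set.mem_ofList _ _).mpr hmem)
  rw [this] at hct
  exact absurd hct (by simp)

-- per-key best, as a function of the key (proof-side summary of one of A's blocks)
def pvSum (annotated : List (String × Int × Int × String))
    (junction_index : List (String × String × List (Int × Int × Int)))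
    (gene_region : Int × Int) (min_length : Int) (k : String × String) : Int × Int × Int :=
  PySem.List.maxD
    (pvCands k.1 k.2 (PySem.Set.ofList annotated) gene_region.1 gene_region.2 min_length
      ((PySem.Dict.mk (junction_index.map (fun t => ((t.1, t.2.1), t.2.2)))).getD k []))
    (fun c => c.1) (0, -1, -1)

-- the propositional reading of pvEligB
def pvElig (annotated : List (String × Int × Int × String)) (gene_region : Int × Int)
    (min_length : Int) (t : String × String × List (Int × Int × Int))
    (j : Int × Int × Int) : Prop :=
  j ∈ t.2.2.takeWhile (fun x => decide (x.1 ≤ gene_region.2)) ∧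
  gene_region.1 ≤ j.1 ∧ j.2.1 ≤ gene_region.2 ∧ min_length ≤ j.2.1 - j.1 + 1 ∧
  (t.1, j.1, j.2.1, t.2.1) ∉ annotated ∧ 0 < j.2.2

theorem pvEligB_iff (annotated gene_region min_length t j) :
    pvEligB annotated gene_region min_length t j = true ↔
      pvElig annotated gene_region min_length t j := by
  simp [pvEligB, pvElig]

-- the propositional reading of Pre_'s pairwise relation
def pvRel (annotated : List (String × Int × Int × String)) (gene_region : Int × Int)
    (min_length : Int) (t u : String × String × List (Int × Int × Int)) : Prop :=
  pvKeyOf t ≠ pvKeyOf u ∧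
  (pvKeyOf t ∈ pvPairs annotated → pvKeyOf u ∈ pvPairs annotated →
    ∀ j ∈ t.2.2, ∀ j' ∈ u.2.2,
      pvElig annotated gene_region min_length t j →
      pvElig annotated gene_region min_length u j' →
      j.2.2 = j'.2.2 → j.1 = j'.1 ∧ j.2.1 = j'.2.1)

theorem pv_pre_pairwise {annotated junction_index gene_region min_length}
    (h : Pre_highest_novel_junction_coverage_py annotated junction_index gene_region min_length) :
    junction_index.Pairwise (pvRel annotated gene_region min_length) := by
  unfold Pre_highest_novel_junction_coverage_py at h
  refine h.imp (fun {t u} htu => ?_)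
  simp only [Bool.and_eq_true, Bool.or_eq_true, Bool.not_eq_true', decide_eq_true_eq,
    decide_eq_false_iff_not, List.all_eq_true] at htu
  obtain ⟨hkey, hrest⟩ := htu
  refine ⟨hkey, fun hmt hmu j hj j' hj' he he' hcov => ?_⟩
  rcases hrest with (h | h) | h
  · exact absurd hmt h
  · exact absurd hmu h
  · rcases h j hj j' hj' with ((hb | hb) | hb) | hb
    · exact absurd ((pvEligB_iff _ _ _ _ _).mpr he) (by simp [hb])
    · exact absurd ((pvEligB_iff _ _ _ _ _).mpr he') (by simp [hb])
    · exact absurd hcov hb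
    · exact hb

theorem pvRel_symm (annotated : List (String × Int × Int × String)) (gene_region : Int × Int)
    (min_length : Int) : Symmetric (pvRel annotated gene_region min_length) := by
  intro t u h
  refine ⟨h.1.symm, fun hmu hmt j' hj' j hj he' he hcov => ?_⟩
  obtain ⟨h1, h2⟩ := h.2 hmt hmu j hj j' hj' he he' hcov.symm
  exact ⟨h1.symm, h2.symm⟩

theorem pvUpd_comm_of (x y : Int × Int × Int) (h : x.1 = y.1 → x = y) (z : Int × Int × Int) :
    pvUpd (pvUpd z x) y = pvUpd (pvUpd z y) x := by
  by_cases hxy : x.1 = y.1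
  · rw [h hxy]
  · unfold pvUpd; split_ifs <;> first | rfl | omega

theorem pv_outerA (aS : PySem.Set (String × Int × Int × String))
    (idx : PySem.Dict (String × String) (List (Int × Int × Int))) (gs ge ml : Int)
    (l : List (String × String)) :
    ∀ st : Int × Int × Int, 0 ≤ st.1 →
      l.foldl (fun st p => pvInnerA p.1 p.2 aS gs ge ml (idx.getD (p.1, p.2) []) st) st =
      l.foldl (fun st k =>
        pvUpd st (PySem.List.maxD (pvCands k.1 k.2 aS gs ge ml (idx.getD k []))
          (fun c => c.1) (0, -1, -1))) st := by
  induction l with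
  | nil => intro st _; rfl
  | cons p l ih =>
      intro st h
      rw [List.foldl_cons, List.foldl_cons, pv_innerA_eq, pv_block _ _ h]
      exact ih _ (pvUpd_fst_nonneg _ _ h)

theorem pv_keys_nodup {annotated junction_index gene_region min_length}
    (h : Pre_highest_novel_junction_coverage_py annotated junction_index gene_region min_length) :
    (junction_index.map pvKeyOf).Nodup := by
  exact List.pairwise_map.mpr ((pv_pre_pairwise h).imp (fun hr => hr.1))

theorem pv_getD_key {junction_index : List (String × String × List (Int × Int × Int))}
    {t : String × String × List (Int × Int × Int)} (ht : t ∈ junction_index)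
    (hnd : (junction_index.map pvKeyOf).Nodup) :
    (PySem.Dict.mk (junction_index.map (fun t => ((t.1, t.2.1), t.2.2)))).getD (pvKeyOf t) [] =
      t.2.2 := by
  refine PySem.Dict.getD_of_mem_items _ ?_ ?_ []
  · exact List.mem_map.mpr ⟨t, ht, rfl⟩
  · show ((junction_index.map (fun t => ((t.1, t.2.1), t.2.2))).map (fun p => p.1)).Nodup
    rw [List.map_map]
    exact hnd

theorem pv_pos_key {annotated : List (String × Int × Int × String)}
    {junction_index : List (String × String × List (Int × Int × Int))}
    {gene_region : Int × Int} {min_length : Int} {k : String × String}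
    (hq : 0 < (pvSum annotated junction_index gene_region min_length k).1) :
    ∃ t ∈ junction_index, pvKeyOf t = k := by
  by_contra hn
  have hn' : ∀ t ∈ junction_index, pvKeyOf t ≠ k := by simpa using hn
  have hcont : (PySem.Dict.mk
      (junction_index.map (fun t => ((t.1, t.2.1), t.2.2)))).contains k = false := by
    rw [PySem.Dict.contains_mk]
    simp only [List.any_eq_false]
    rintro p hp
    obtain ⟨t, ht, rfl⟩ := List.mem_map.mp hp
    simpa using fun h => hn' t ht (by simpa [pvKeyOf] using h)
  have hgetD := PySem.Dict.getD_of_not_contains _ ([] : List (Int × Int × Int)) hcont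
  unfold pvSum at hq
  rw [hgetD] at hq
  simp [pvCands, pvRegionPrefix, PySem.List.maxD, PySem.List.max?] at hq

theorem pv_coh {annotated : List (String × Int × Int × String)}
    {junction_index : List (String × String × List (Int × Int × Int))}
    {gene_region : Int × Int} {min_length : Int} {k1 k2 : String × String}
    (hpre : Pre_highest_novel_junction_coverage_py annotated junction_index gene_region min_length)
    (hk1w : k1 ∈ PySem.Set.ofList (annotated.map (fun a => (a.1, a.2.2.2))))
    (hk2w : k2 ∈ PySem.Set.ofList (annotated.map (fun a => (a.1, a.2.2.2))))
    (h1 : 0 < (pvSum annotated junction_index gene_region min_length k1).1)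
    (h2 : 0 < (pvSum annotated junction_index gene_region min_length k2).1)
    (heq : (pvSum annotated junction_index gene_region min_length k1).1 =
      (pvSum annotated junction_index gene_region min_length k2).1) :
    pvSum annotated junction_index gene_region min_length k1 =
      pvSum annotated junction_index gene_region min_length k2 := by
  by_cases hk : k1 = k2
  · rw [hk]
  · obtain ⟨t1, ht1, hkt1⟩ := pv_pos_key h1
    obtain ⟨t2, ht2, hkt2⟩ := pv_pos_key h2
    have hnd := pv_keys_nodup hpre
    have hget1 := pv_getD_key ht1 hnd
    have hget2 := pv_getD_key ht2 hnd
    rw [hkt1] at hget1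
    rw [hkt2] at hget2
    have hx : pvSum annotated junction_index gene_region min_length k1 ∈
        pvCands k1.1 k1.2 (PySem.Set.ofList annotated) gene_region.1 gene_region.2 min_length
          t1.2.2 := by
      rcases pv_maxD_default_or_mem (pvCands k1.1 k1.2 (PySem.Set.ofList annotated) gene_region.1
          gene_region.2 min_length ((PySem.Dict.mk (junction_index.map
            (fun t => ((t.1, t.2.1), t.2.2)))).getD k1 [])) with hd | hm
      · exact absurd h1 (by unfold pvSum; rw [hd]; simp)
      · unfold pvSum
        rw [← hget1]
        exact hm
    have hy : pvSum annotated junction_index gene_region min_length k2 ∈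
        pvCands k2.1 k2.2 (PySem.Set.ofList annotated) gene_region.1 gene_region.2 min_length
          t2.2.2 := by
      rcases pv_maxD_default_or_mem (pvCands k2.1 k2.2 (PySem.Set.ofList annotated) gene_region.1
          gene_region.2 min_length ((PySem.Dict.mk (junction_index.map
            (fun t => ((t.1, t.2.1), t.2.2)))).getD k2 [])) with hd | hm
      · exact absurd h2 (by unfold pvSum; rw [hd]; simp)
      · unfold pvSum
        rw [← hget2]
        exact hm
    obtain ⟨j1, hj1m, hj1tw, hj1gs, hj1ge, hj1ml, hj1na, hxeq⟩ := pv_mem_cands hx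
    obtain ⟨j2, hj2m, hj2tw, hj2gs, hj2ge, hj2ml, hj2na, hyeq⟩ := pv_mem_cands hy
    have ht12 : t1 ≠ t2 := fun he => hk (by rw [← hkt1, ← hkt2, he])
    have hrel := (pv_pre_pairwise hpre).forall (pvRel_symm annotated gene_region min_length)
      ht1 ht2 ht12
    have hc1 : t1.1 = k1.1 := congrArg Prod.fst hkt1
    have hs1 : t1.2.1 = k1.2 := congrArg Prod.snd hkt1
    have hc2 : t2.1 = k2.1 := congrArg Prod.fst hkt2
    have hs2 : t2.2.1 = k2.2 := congrArg Prod.snd hkt2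
    have hm1 : pvKeyOf t1 ∈ pvPairs annotated := by
      rw [show pvKeyOf t1 = k1 from hkt1]
      exact (PySem.Set.mem_ofList _ _).mp hk1w
    have hm2 : pvKeyOf t2 ∈ pvPairs annotated := by
      rw [show pvKeyOf t2 = k2 from hkt2]
      exact (PySem.Set.mem_ofList _ _).mp hk2w
    have hpos1 : 0 < j1.2.2 := by
      rw [hxeq] at h1; exact h1
    have hpos2 : 0 < j2.2.2 := by
      rw [hyeq] at h2; exact h2
    have he1 : pvElig annotated gene_region min_length t1 j1 := by
      refine ⟨hj1tw, hj1gs, hj1ge, hj1ml, ?_, hpos1⟩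
      rw [hc1, hs1]; exact hj1na
    have he2 : pvElig annotated gene_region min_length t2 j2 := by
      refine ⟨hj2tw, hj2gs, hj2ge, hj2ml, ?_, hpos2⟩
      rw [hc2, hs2]; exact hj2na
    have hcov : j1.2.2 = j2.2.2 := by
      have := heq
      rw [hxeq, hyeq] at this
      exact this
    obtain ⟨e1, e2⟩ := hrel.2 hm1 hm2 j1 hj1m j2 hj2m he1 he2 hcov
    rw [hxeq, hyeq, hcov, e1, e2]

-- ===== the sort-then-pick side: head of the stable reverse sort = running maximum =====

theorem pv_sorted_head (xs : List (Int × Int × Int)) (hpos : ∀ x ∈ xs, 0 < x.1) :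
    (PySem.List.sorted xs (fun c => c.1) true).headD (0, -1, -1) =
      xs.foldl pvUpd (0, -1, -1) := by
  induction xs using List.reverseRecOn with
  | nil => rfl
  | append_singleton xs x ih =>
      have hpos' : ∀ y ∈ xs, 0 < y.1 := fun y hy => hpos y (List.mem_append_left _ hy)
      have hx : 0 < x.1 := hpos x (List.mem_append_right _ (List.mem_singleton_self x))
      rw [PySem.List.sorted_rev_eq_foldl_insertBy, List.foldl_append, List.foldl_cons,
        List.foldl_nil, ← PySem.List.sorted_rev_eq_foldl_insertBy,
        List.foldl_append, List.foldl_cons, List.foldl_nil, ← ih hpos']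
      cases hS : PySem.List.sorted xs (fun c => c.1) true with
      | nil =>
          show ([x].headD _) = pvUpd (([] : List (Int × Int × Int)).headD (0, -1, -1)) x
          simp [pvUpd, hx]
      | cons m t =>
          show (PySem.List.insertBy _ x (m :: t)).headD _ = pvUpd m x
          simp only [PySem.List.insertBy, pvUpd]
          by_cases h : m.1 < x.1
          · rw [if_pos (by simpa using h), if_pos (show x.1 > m.1 from h)]
            rfl
          · rw [if_neg (by simpa using h), if_neg (show ¬ x.1 > m.1 from h)]
            rfl

-- the pool comprehension's 'if (chrom, strand) in wanted' turns the flatMap into a filter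
theorem pv_flatMap_ite {α : Type} (jx : List (String × String × List (Int × Int × Int)))
    (p : String × String × List (Int × Int × Int) → Bool)
    (f : String × String × List (Int × Int × Int) → List α) :
    (jx.flatMap (fun t => if p t then f t else [])) = (jx.filter p).flatMap f := by
  induction jx with
  | nil => rfl
  | cons t jx ih =>
      by_cases h : p t
      · simp [h, ih]
      · simp [h, ih]

-- one pool block is the positivity filter of the block's candidate list
theorem pv_block_filter (c s : String) (aS : PySem.Set (String × Int × Int × String))
    (gs ge ml : Int) (L : List (Int × Int × Int)) :
    ((pvRegionPrefix ge L).filter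
        (fun j => decide (gs ≤ j.1) && decide (j.2.1 ≤ ge) &&
          decide (j.2.1 - j.1 + 1 ≥ ml) && !(PySem.Set.contains aS (c, j.1, j.2.1, s)) &&
          decide (j.2.2 > 0))).map (fun j => (j.2.2, j.1, j.2.1)) =
      (pvCands c s aS gs ge ml L).filter (fun x => decide (0 < x.1)) := by
  unfold pvCands
  rw [List.filter_map, List.filter_filter]
  refine congrArg _ (List.filter_congr fun j _ => ?_)
  show (_ && decide (j.2.2 > 0)) = (decide (0 < (j.2.2, j.1, j.2.1).1) && _)
  rw [Bool.and_comm]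

-- folding pvUpd through the concatenated filtered blocks = folding the per-block maxima
theorem pv_fold_blocks (aS : PySem.Set (String × Int × Int × String)) (gs ge ml : Int)
    (L : List (String × String × List (Int × Int × Int))) :
    ∀ st : Int × Int × Int, 0 ≤ st.1 →
      (L.flatMap (fun t =>
        (pvCands t.1 t.2.1 aS gs ge ml t.2.2).filter (fun x => decide (0 < x.1)))).foldl
          pvUpd st =
      L.foldl (fun st t =>
        pvUpd st (PySem.List.maxD (pvCands t.1 t.2.1 aS gs ge ml t.2.2)
          (fun c => c.1) (0, -1, -1))) st := by
  induction L with
  | nil => intro st _; rfl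
  | cons t L ih =>
      intro st h
      rw [List.flatMap_cons, List.foldl_append, List.foldl_cons,
        ← pv_drop _ st h, pv_block _ _ h]
      exact ih _ (pvUpd_fst_nonneg _ _ h)

-- ===== VERDICT (by name: the statement is the Claim_ definition above) =====
theorem highest_novel_junction_coverage_py_spec : Claim_equal_highest_novel_junction_coverage_py := by
  intro annotated jx gr ml _hdom hpre
  unfold Spec_highest_novel_junction_coverage_py
  by_cases hann : annotated = []
  · simp [highest_novel_junction_coverage_py, highest_novel_junction_coverage_py_alt, hann]
  · have hnd := pv_keys_nodup hpre
    have hzero : (0 : Int) ≤ (((0 : Int), (-1 : Int), (-1 : Int)) :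
      Int × Int × Int).1 := le_refl 0
    have hA : highest_novel_junction_coverage_py annotated jx gr ml =
        ((PySem.Set.ofList (annotated.map (fun a => (a.1, a.2.2.2)))).map
          (pvSum annotated jx gr ml)).foldl pvUpd (0, -1, -1) := by
      simp only [highest_novel_junction_coverage_py]
      rw [if_neg hann, List.foldl_map]
      exact pv_outerA _ _ _ _ _ _ _ hzero
    have hB : highest_novel_junction_coverage_py_alt annotated jx gr ml =
        (((jx.filter (fun t => PySem.Set.contains
            (PySem.Set.ofList (annotated.map (fun a => (a.1, a.2.2.2)))) (t.1, t.2.1))).map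
          pvKeyOf).map (pvSum annotated jx gr ml)).foldl pvUpd (0, -1, -1) := by
      simp only [highest_novel_junction_coverage_py_alt]
      rw [if_neg hann]
      have hfun : (fun t : String × String × List (Int × Int × Int) =>
          ((pvRegionPrefix gr.2 t.2.2).filter
            (fun j => decide (gr.1 ≤ j.1) && decide (j.2.1 ≤ gr.2) &&
              decide (j.2.1 - j.1 + 1 ≥ ml) &&
              !(PySem.Set.contains (PySem.Set.ofList annotated) (t.1, j.1, j.2.1, t.2.1)) &&
              decide (j.2.2 > 0))).map (fun j => (j.2.2, j.1, j.2.1))) =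
          (fun t : String × String × List (Int × Int × Int) =>
            (pvCands t.1 t.2.1 (PySem.Set.ofList annotated) gr.1 gr.2 ml t.2.2).filter
              (fun x => decide (0 < x.1))) := by
        funext t
        exact pv_block_filter t.1 t.2.1 (PySem.Set.ofList annotated) gr.1 gr.2 ml t.2.2
      rw [pv_flatMap_ite, hfun]
      set pool := ((jx.filter (fun t => PySem.Set.contains
          (PySem.Set.ofList (annotated.map (fun a => (a.1, a.2.2.2)))) (t.1, t.2.1))).flatMap
        (fun t => (pvCands t.1 t.2.1 (PySem.Set.ofList annotated) gr.1 gr.2 ml t.2.2).filter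
          (fun x => decide (0 < x.1)))) with hpool
      have hpos : ∀ x ∈ pool, 0 < x.1 := by
        intro x hx
        rw [hpool] at hx
        obtain ⟨t, _, hxb⟩ := List.mem_flatMap.mp hx
        have := (List.mem_filter.mp hxb).2
        simpa using this
      have hhead : (match PySem.List.sorted pool (fun c => c.1) true with
          | [] => (((0 : Int), (-1 : Int), (-1 : Int)) : Int × Int × Int)
          | x :: _ => x) = (PySem.List.sorted pool (fun c => c.1) true).headD (0, -1, -1) := by
        cases PySem.List.sorted pool (fun c => c.1) true <;> rfl
      rw [hhead, pv_sorted_head pool hpos, hpool, pv_fold_blocks _ _ _ _ _ _ hzero,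
        List.foldl_map, List.foldl_map]
      refine PySem.List.foldl_congr_mem _ _ _ _ (fun st t ht => ?_)
      have hget := pv_getD_key (List.mem_of_mem_filter ht) hnd
      show _ = pvUpd st (pvSum annotated jx gr ml (pvKeyOf t))
      unfold pvSum
      rw [hget]
      rfl
    have hmemiff : ∀ k : String × String,
        k ∈ (PySem.Set.ofList (annotated.map (fun a => (a.1, a.2.2.2)))).filter
            (fun k => decide (0 < (pvSum annotated jx gr ml k).1)) ↔
        k ∈ (((jx.filter (fun t => PySem.Set.contains
            (PySem.Set.ofList (annotated.map (fun a => (a.1, a.2.2.2)))) (t.1, t.2.1))).map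
              pvKeyOf).filter
            (fun k => decide (0 < (pvSum annotated jx gr ml k).1))) := by
      intro k
      constructor
      · intro hk
        obtain ⟨hkw, hkq⟩ := List.mem_filter.mp hk
        obtain ⟨t, ht, hkt⟩ := pv_pos_key (by simpa using hkq)
        refine List.mem_filter.mpr ⟨?_, hkq⟩
        refine List.mem_map.mpr ⟨t, List.mem_filter.mpr ⟨ht, ?_⟩, hkt⟩
        rw [show ((t.1, t.2.1) : String × String) = k from hkt]
        exact (PySem.Set.contains_iff _ _).mpr hkw
      · intro hk
        obtain ⟨hkm, hkq⟩ := List.mem_filter.mp hk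
        obtain ⟨t, htf, hkt⟩ := List.mem_map.mp hkm
        have hg := (List.mem_filter.mp htf).2
        refine List.mem_filter.mpr ⟨?_, hkq⟩
        rw [← hkt]
        exact (PySem.Set.contains_iff _ _).mp hg
    have hnodup1 : ((PySem.Set.ofList (annotated.map (fun a => (a.1, a.2.2.2)))).filter
        (fun k => decide (0 < (pvSum annotated jx gr ml k).1))).Nodup :=
      (PySem.Set.nodup_ofList _).filter _
    have hnodup2 : (((jx.filter (fun t => PySem.Set.contains
        (PySem.Set.ofList (annotated.map (fun a => (a.1, a.2.2.2)))) (t.1, t.2.1))).map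
          pvKeyOf).filter
        (fun k => decide (0 < (pvSum annotated jx gr ml k).1))).Nodup :=
      (List.Nodup.sublist (List.Sublist.map pvKeyOf List.filter_sublist) hnd).filter _
    have hperm := (List.perm_ext_iff_of_nodup hnodup1 hnodup2).mpr hmemiff
    have hcomm : ∀ x ∈ ((PySem.Set.ofList (annotated.map (fun a => (a.1, a.2.2.2)))).filter
          (fun k => decide (0 < (pvSum annotated jx gr ml k).1))).map (pvSum annotated jx gr ml),
        ∀ y ∈ ((PySem.Set.ofList (annotated.map (fun a => (a.1, a.2.2.2)))).filter
          (fun k => decide (0 < (pvSum annotated jx gr ml k).1))).map (pvSum annotated jx gr ml),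
        ∀ z, pvUpd (pvUpd z x) y = pvUpd (pvUpd z y) x := by
      intro x hx y hy z
      obtain ⟨k1, hk1, rfl⟩ := List.mem_map.mp hx
      obtain ⟨k2, hk2, rfl⟩ := List.mem_map.mp hy
      obtain ⟨hk1w, hk1q⟩ := List.mem_filter.mp hk1
      obtain ⟨hk2w, hk2q⟩ := List.mem_filter.mp hk2
      exact pvUpd_comm_of _ _
        (fun hf => pv_coh hpre hk1w hk2w (by simpa using hk1q) (by simpa using hk2q) hf) z
    calc highest_novel_junction_coverage_py annotated jx gr ml
        = List.foldl pvUpd (((0 : Int), (-1 : Int), (-1 : Int)) : Int × Int × Int) ((PySem.Set.ofList (annotated.map (fun a => (a.1, a.2.2.2)))).map (pvSum annotated jx gr ml)) := hA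
      _ = List.foldl pvUpd (((0 : Int), (-1 : Int), (-1 : Int)) : Int × Int × Int) (((PySem.Set.ofList (annotated.map (fun a => (a.1, a.2.2.2)))).map (pvSum annotated jx gr ml)).filter (fun c : Int × Int × Int => decide (0 < c.1))) := pv_drop _ _ hzero
      _ = List.foldl pvUpd (((0 : Int), (-1 : Int), (-1 : Int)) : Int × Int × Int) (((PySem.Set.ofList (annotated.map (fun a => (a.1, a.2.2.2)))).filter ((fun c : Int × Int × Int => decide (0 < c.1)) ∘ (pvSum annotated jx gr ml))).map (pvSum annotated jx gr ml)) := by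
            rw [List.filter_map]
      _ = List.foldl pvUpd (((0 : Int), (-1 : Int), (-1 : Int)) : Int × Int × Int) (((((jx.filter (fun t => PySem.Set.contains (PySem.Set.ofList (annotated.map (fun a => (a.1, a.2.2.2)))) (t.1, t.2.1))).map pvKeyOf)).filter ((fun c : Int × Int × Int => decide (0 < c.1)) ∘ (pvSum annotated jx gr ml))).map (pvSum annotated jx gr ml)) :=
            List.Perm.foldl_eq' (List.Perm.map (pvSum annotated jx gr ml) hperm) hcomm _
      _ = List.foldl pvUpd (((0 : Int), (-1 : Int), (-1 : Int)) : Int × Int × Int) (((((jx.filter (fun t => PySem.Set.contains (PySem.Set.ofList (annotated.map (fun a => (a.1, a.2.2.2)))) (t.1, t.2.1))).map pvKeyOf)).map (pvSum annotated jx gr ml)).filter (fun c : Int × Int × Int => decide (0 < c.1))) := by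
            conv_rhs => rw [List.filter_map]
      _ = List.foldl pvUpd (((0 : Int), (-1 : Int), (-1 : Int)) : Int × Int × Int) ((((jx.filter (fun t => PySem.Set.contains (PySem.Set.ofList (annotated.map (fun a => (a.1, a.2.2.2)))) (t.1, t.2.1))).map pvKeyOf)).map (pvSum annotated jx gr ml)) := (pv_drop _ _ hzero).symm
      _ = highest_novel_junction_coverage_py_alt annotated jx gr ml := hB.symm
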